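-- pv_equiv track=rewrite | github.com/thanhxuan217/sino-nom-sentence-segmentation-punctuation | api/inference.py | _stitch_fragments_no_strip
-- ===== SOURCE A (Python) =====
-- from typing import Dict, List, Optional, Tuple
--
-- def build_raw_to_pred_map(raw_text: str, pred_text: str) -> List[int]:
--     """Map each raw character index to its index in the predicted string."""
--     raw_to_pred: List[int] = []
--     pred_idx = 0
--
--     for raw_char in raw_text:
--         while pred_idx < len(pred_text) and pred_text[pred_idx] != raw_char:
--             pred_idx += 1
--         raw_to_pred.append(pred_idx)
--         pred_idx += 1
--
--     return raw_to_pred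
--
-- def _stitch_fragments_no_strip(
--
--     fragments: List[Tuple[str, str, List[str]]],
--     overlap: int,
-- ) -> Tuple[str, List[str]]:
--     """Stitch fragments by simple overlap removal (no sentence stripping)."""
--     doc_parts: List[str] = []
--     doc_pred_labels: List[str] = []
--
--     prev_raw: Optional[str] = None
--     prev_pred: Optional[str] = None
--     prev_pred_labels: Optional[List[str]] = None
--     prev_overlap_start_raw = 0
--
--     for raw_text, pred_text, pred_labels in fragments:
--         if prev_raw is None:
--             prev_raw = raw_text
--             prev_pred = pred_text
--             prev_pred_labels = pred_labels
--             prev_overlap_start_raw = 0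
--             continue
--
--         if prev_overlap_start_raw > 0:
--             r2p = build_raw_to_pred_map(prev_raw, prev_pred)
--             if prev_overlap_start_raw < len(r2p):
--                 pred_start = r2p[prev_overlap_start_raw]
--                 doc_parts.append(prev_pred[pred_start:])
--         else:
--             doc_parts.append(prev_pred)
--
--         doc_pred_labels.extend(prev_pred_labels[prev_overlap_start_raw:])
--
--         prev_raw = raw_text
--         prev_pred = pred_text
--         prev_pred_labels = pred_labels
--         prev_overlap_start_raw = overlap
--
--     if prev_pred is not None:
--         if prev_overlap_start_raw > 0:
--             r2p = build_raw_to_pred_map(prev_raw, prev_pred)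
--             if prev_overlap_start_raw < len(r2p):
--                 pred_start = r2p[prev_overlap_start_raw]
--                 doc_parts.append(prev_pred[pred_start:])
--         else:
--             doc_parts.append(prev_pred)
--
--         doc_pred_labels.extend(prev_pred_labels[prev_overlap_start_raw:])
--
--     result_text = "".join(doc_parts)
--     return result_text, doc_pred_labels
-- ===== SOURCE B (Python) =====
-- from typing import List, Tuple
--
--
-- def _pred_tail(raw_text: str, pred_text: str, start: int) -> str:
--     """Suffix of pred_text left after consuming the overlap of `start` raw chars.
--
--     Works destructively on the remaining suffix of pred_text with str.find
--     (chop off everything up to and including each matched char), instead of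
--     building a raw-index -> pred-index map and slicing at an index.
--     """
--     if start <= 0:
--         return pred_text
--     if start >= len(raw_text):
--         return ""
--     rest = pred_text
--     for ch in raw_text[:start]:
--         pos = rest.find(ch)
--         rest = rest[pos + 1:] if pos >= 0 else ""
--     pos = rest.find(raw_text[start])
--     return rest[pos:] if pos >= 0 else ""
--
--
-- def _stitch_fragments_no_strip(
--     fragments: List[Tuple[str, str, List[str]]],
--     overlap: int,
-- ) -> Tuple[str, List[str]]:
--     """Stitch fragments by simple overlap removal (no sentence stripping)."""
--     starts = [0 if i == 0 else overlap for i in range(len(fragments))]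
--     text = "".join(
--         _pred_tail(r, p, s) for (r, p, _), s in zip(fragments, starts)
--     )
--     labels = [
--         lab for (_, _, labs), s in zip(fragments, starts) for lab in labs[s:]
--     ]
--     return text, labels
-- ===== Notes on version B (the rewrite author's own statement) =====
-- stated objective: faster
-- what changed: B never builds A's raw-index-to-pred-index map nor slices at a looked-up index: per fragment it keeps only the remaining pred suffix and chops it with str.find (drop through each matched overlap char, then cut at the match of the boundary char), scanning only up to the overlap point, and it replaces A's lag-by-one prev_* state machine with a direct map/join over (fragment, start) pairs.
import Mathlib
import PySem

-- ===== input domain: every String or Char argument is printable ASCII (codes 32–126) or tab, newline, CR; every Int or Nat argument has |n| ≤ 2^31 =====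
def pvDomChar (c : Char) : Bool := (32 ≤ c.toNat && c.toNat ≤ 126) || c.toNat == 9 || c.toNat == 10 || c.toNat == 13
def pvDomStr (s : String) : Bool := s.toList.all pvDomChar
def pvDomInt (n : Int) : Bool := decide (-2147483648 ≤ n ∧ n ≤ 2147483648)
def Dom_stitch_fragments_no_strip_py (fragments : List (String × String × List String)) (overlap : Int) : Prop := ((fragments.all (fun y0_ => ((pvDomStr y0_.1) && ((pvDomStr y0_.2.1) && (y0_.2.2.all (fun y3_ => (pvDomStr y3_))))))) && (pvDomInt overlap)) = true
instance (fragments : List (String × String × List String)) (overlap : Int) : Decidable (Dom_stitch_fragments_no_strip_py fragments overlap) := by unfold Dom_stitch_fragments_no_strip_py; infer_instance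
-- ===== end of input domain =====

-- B drops A's lag-by-one state machine and its raw-index→pred-index map: it maps each
-- fragment to the pred suffix left after chopping the matched overlap off the front
-- with find-and-drop on the remaining suffix, scanning only up to the overlap point
-- (objective: faster, measured).

-- ===== PORT A =====

-- the inner `while pred_idx < len(pred_text) and pred_text[pred_idx] != raw_char` loop
def pvAdvanceA (pred : List Char) (c : Char) (i : Nat) : Nat :=
  if h : i < pred.length then
    if pred[i] = c then i else pvAdvanceA pred c (i + 1)
  else i
termination_by pred.length - i

-- build_raw_to_pred_map, on char lists
def build_raw_to_pred_map_py (raw pred : List Char) : List Nat :=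
  (raw.foldl
    (fun (st : List Nat × Nat) ch =>
      let j := pvAdvanceA pred ch st.2
      (st.1 ++ [j], j + 1))
    ([], 0)).1

-- the flush block A performs both inside the loop and after it
def pvFlushA (parts : List (List Char)) (labels : List String)
    (praw ppred : List Char) (plabels : List String) (pstart : Int) :
    List (List Char) × List String :=
  let parts' :=
    if pstart > 0 then
      let r2p := build_raw_to_pred_map_py praw ppred
      if pstart < (r2p.length : Int) then
        let pred_start := PySem.List.pyGetD r2p pstart 0
        parts ++ [PySem.List.slice ppred (some (pred_start : Int)) none]
      else parts
    else parts ++ [ppred]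
  (parts', labels ++ PySem.List.slice plabels (some pstart) none)

-- one iteration of A's `for raw_text, pred_text, pred_labels in fragments` loop
def pvStepA (overlap : Int)
    (st : List (List Char) × List String × Option (List Char × List Char × List String) × Int)
    (frag : String × String × List String) :
    List (List Char) × List String × Option (List Char × List Char × List String) × Int :=
  match st.2.2.1 with
  | none => (st.1, st.2.1, some (frag.1.toList, frag.2.1.toList, frag.2.2), 0)
  | some (praw, ppred, plabs) =>
      let fl := pvFlushA st.1 st.2.1 praw ppred plabs st.2.2.2
      (fl.1, fl.2, some (frag.1.toList, frag.2.1.toList, frag.2.2), overlap)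

-- A's `if prev_pred is not None:` post-loop flush
def pvFinA (st : List (List Char) × List String × Option (List Char × List Char × List String) × Int) :
    List (List Char) × List String :=
  match st.2.2.1 with
  | none => (st.1, st.2.1)
  | some (praw, ppred, plabs) => pvFlushA st.1 st.2.1 praw ppred plabs st.2.2.2

def stitch_fragments_no_strip_py (fragments : List (String × String × List String)) (overlap : Int) : String × List String :=
  let fin := pvFinA (fragments.foldl (pvStepA overlap) ([], [], none, 0))
  (String.ofList (PySem.Chars.join [] fin.1), fin.2)

-- ===== PORT B =====

-- `pos = rest.find(ch); rest = rest[pos+1:] if pos >= 0 else ""`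
def pvChop (rest : List Char) (c : Char) : List Char :=
  match rest.findIdx? (fun x => x == c) with
  | some p => rest.drop (p + 1)
  | none => []

-- `pos = rest.find(c); return rest[pos:] if pos >= 0 else ""`
def pvTailAt (rest : List Char) (c : Char) : List Char :=
  match rest.findIdx? (fun x => x == c) with
  | some p => rest.drop p
  | none => []

-- _pred_tail
def pvPredTailB (raw pred : List Char) (start : Int) : List Char :=
  if start ≤ 0 then pred
  else if (raw.length : Int) ≤ start then []
  else
    let rest := (PySem.List.slice raw none (some start)).foldl pvChop pred
    -- raw[start]: in range here since 0 < start < len(raw)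
    pvTailAt rest (raw.getD start.toNat ' ')

def stitch_fragments_no_strip_py_alt (fragments : List (String × String × List String)) (overlap : Int) : String × List String :=
  let starts := (List.range fragments.length).map (fun i => if i = 0 then (0 : Int) else overlap)
  let text := PySem.Chars.join []
    ((fragments.zip starts).map (fun p => pvPredTailB p.1.1.toList p.1.2.1.toList p.2))
  let labels := (fragments.zip starts).flatMap (fun p => PySem.List.slice p.1.2.2 (some p.2) none)
  (String.ofList text, labels)

-- ===== PRECONDITION & SPEC =====
def Spec_stitch_fragments_no_strip_py (fragments : List (String × String × List String)) (overlap : Int) (out : String × List String) : Prop := out = stitch_fragments_no_strip_py_alt fragments overlap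
instance (fragments : List (String × String × List String)) (overlap : Int) (out : String × List String) : Decidable (Spec_stitch_fragments_no_strip_py fragments overlap out) := by unfold Spec_stitch_fragments_no_strip_py; infer_instance

-- ===== CLAIM (what is proved, stated in full; the proofs are below) =====
def Claim_equal_stitch_fragments_no_strip_py : Prop := ∀ (fragments : List (String × String × List String)) (overlap : Int), Dom_stitch_fragments_no_strip_py fragments overlap → Spec_stitch_fragments_no_strip_py fragments overlap (stitch_fragments_no_strip_py fragments overlap)

-- ===== LEMMAS AND PROOFS =====

-- the raw→pred index list of A, defined structurally
def pvMapList (pred : List Char) : List Char → Nat → List Nat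
  | [], _ => []
  | c :: cs, i =>
      let j := pvAdvanceA pred c i
      j :: pvMapList pred cs (j + 1)

-- the pred pointer after greedily matching the chars of l, starting at i
def pvIdxAfter (pred : List Char) (l : List Char) (i : Nat) : Nat :=
  l.foldl (fun i c => pvAdvanceA pred c i + 1) i

theorem pvMapList_length (pred : List Char) (l : List Char) (i : Nat) :
    (pvMapList pred l i).length = l.length := by
  induction l generalizing i with
  | nil => rfl
  | cons c cs ih => simp [pvMapList, ih]

theorem pvBuildFold (pred : List Char) (l : List Char) (acc : List Nat) (i : Nat) :
    (l.foldl (fun (st : List Nat × Nat) ch =>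
        let j := pvAdvanceA pred ch st.2
        (st.1 ++ [j], j + 1)) (acc, i)).1 = acc ++ pvMapList pred l i := by
  induction l generalizing acc i with
  | nil => simp [pvMapList]
  | cons c cs ih => simp [pvMapList, ih]

theorem build_raw_to_pred_map_py_eq (raw pred : List Char) :
    build_raw_to_pred_map_py raw pred = pvMapList pred raw 0 := by
  simpa using pvBuildFold pred raw [] 0

theorem pvMapList_getD (pred : List Char) (l : List Char) (k i : Nat) (h : k < l.length) :
    (pvMapList pred l i).getD k 0
      = pvAdvanceA pred (l.getD k ' ') (pvIdxAfter pred (l.take k) i) := by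
  induction l generalizing k i with
  | nil => simp at h
  | cons c cs ih =>
      cases k with
      | zero => simp [pvMapList, pvIdxAfter]
      | succ k =>
          have hk : k < cs.length := by simpa using h
          simp only [pvMapList, List.getD_cons_succ, List.take_succ_cons]
          rw [ih k _ hk]
          simp [pvIdxAfter]

-- B's tail-from-match on a pred suffix = pred suffix at A's advanced pointer
theorem pvTailAt_drop (pred : List Char) (c : Char) (i : Nat) :
    pvTailAt (pred.drop i) c = pred.drop (pvAdvanceA pred c i) := by
  unfold pvAdvanceA
  by_cases h : i < pred.length
  · rw [List.drop_eq_getElem_cons h]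
    by_cases hc : pred[i] = c
    · simp only [pvTailAt, List.findIdx?_cons, beq_iff_eq, hc, if_pos, List.drop_zero]
      simp only [h, dif_pos]
      rw [← hc, ← List.drop_eq_getElem_cons h]
    · have ih := pvTailAt_drop pred c (i + 1)
      simp only [h, dif_pos, hc, if_neg, not_false_iff]
      unfold pvTailAt at ih ⊢
      rw [List.findIdx?_cons]
      simp only [beq_iff_eq, hc, if_neg, not_false_iff]
      cases hf : (pred.drop (i + 1)).findIdx? (fun x => x == c) with
      | none => simpa [hf] using ih
      | some p =>
          rw [hf] at ih
          simpa [hf, List.drop_drop, Nat.add_comm, Nat.add_left_comm, Nat.add_assoc] using ih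
  · have hd : pred.drop i = [] := List.drop_eq_nil_of_le (by omega)
    have hd' : pred.drop i = pred.drop i := rfl
    simp [pvTailAt, hd, h]
termination_by pred.length - i

theorem pvChop_eq_tail_drop (rest : List Char) (c : Char) :
    pvChop rest c = (pvTailAt rest c).drop 1 := by
  unfold pvChop pvTailAt
  cases hf : rest.findIdx? (fun x => x == c) with
  | none => simp
  | some p => simp [List.drop_drop]

theorem pvChop_drop (pred : List Char) (c : Char) (i : Nat) :
    pvChop (pred.drop i) c = pred.drop (pvAdvanceA pred c i + 1) := by
  rw [pvChop_eq_tail_drop, pvTailAt_drop, List.drop_drop]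

theorem pvChopFold (pred : List Char) (l : List Char) (i : Nat) :
    l.foldl pvChop (pred.drop i) = pred.drop (pvIdxAfter pred l i) := by
  induction l generalizing i with
  | nil => simp [pvIdxAfter]
  | cons c cs ih =>
      simp only [List.foldl_cons, pvChop_drop, pvIdxAfter] at *
      exact ih _

-- the text piece A flushes for one fragment equals B's _pred_tail
theorem pvFlush_parts (parts : List (List Char)) (labels : List String)
    (praw ppred : List Char) (plabels : List String) (pstart : Int) :
    ((pvFlushA parts labels praw ppred plabels pstart).1).flatten
      = parts.flatten ++ pvPredTailB praw ppred pstart := by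
  unfold pvFlushA pvPredTailB
  by_cases h0 : pstart > 0
  · have hn0 : ¬ pstart ≤ 0 := by omega
    have hlen : (build_raw_to_pred_map_py praw ppred).length = praw.length := by
      rw [build_raw_to_pred_map_py_eq, pvMapList_length]
    by_cases hlt : pstart < ((build_raw_to_pred_map_py praw ppred).length : Int)
    · have hraw : ¬ ((praw.length : Int) ≤ pstart) := by omega
      simp only [h0, hn0, hlt, hraw, if_pos, if_neg, not_false_iff, List.flatten_append,
        List.flatten_cons, List.flatten_nil, List.append_nil]
      have hk : pstart.toNat < praw.length := by omega
      -- A's slice index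
      have hget : PySem.List.pyGetD (build_raw_to_pred_map_py praw ppred) pstart 0
          = pvAdvanceA ppred (praw.getD pstart.toNat ' ')
              (pvIdxAfter ppred (praw.take pstart.toNat) 0) := by
        rw [show pstart = ((pstart.toNat : Nat) : Int) by omega,
          PySem.List.pyGetD_natCast, build_raw_to_pred_map_py_eq]
        exact pvMapList_getD ppred praw pstart.toNat 0 hk
      -- B's rest
      have hrest : (PySem.List.slice praw none (some pstart)).foldl pvChop ppred
          = ppred.drop (pvIdxAfter ppred (praw.take pstart.toNat) 0) := by
        rw [PySem.List.slice_to praw (by omega)]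
        simpa using pvChopFold ppred (praw.take pstart.toNat) 0
      rw [hrest, pvTailAt_drop, hget,
        PySem.List.slice_from ppred (by positivity), Int.toNat_natCast]
    · have hraw : (praw.length : Int) ≤ pstart := by omega
      simp [h0, hn0, hlt, hraw]
  · have hle : pstart ≤ 0 := by omega
    simp [h0, hle]

theorem pvFlush_labels (parts : List (List Char)) (labels : List String)
    (praw ppred : List Char) (plabels : List String) (pstart : Int) :
    (pvFlushA parts labels praw ppred plabels pstart).2
      = labels ++ PySem.List.slice plabels (some pstart) none := by
  unfold pvFlushA
  rfl

-- abbreviations for B's per-fragment pieces (proof-side only)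
def pvTextOf (f : String × String × List String) (s : Int) : List Char :=
  pvPredTailB f.1.toList f.2.1.toList s

def pvLabsOf (f : String × String × List String) (s : Int) : List String :=
  PySem.List.slice f.2.2 (some s) none

-- A's loop from a state holding a pending fragment, followed by the final flush
theorem pvLoop_inv (overlap : Int) (rest : List (String × String × List String))
    (parts : List (List Char)) (labels : List String)
    (praw ppred : List Char) (plabs : List String) (pstart : Int) :
    ((pvFinA (rest.foldl (pvStepA overlap) (parts, labels, some (praw, ppred, plabs), pstart))).1.flatten,
     (pvFinA (rest.foldl (pvStepA overlap) (parts, labels, some (praw, ppred, plabs), pstart))).2)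
    = (parts.flatten ++ pvPredTailB praw ppred pstart
         ++ (rest.map (fun f => pvTextOf f overlap)).flatten,
       labels ++ PySem.List.slice plabs (some pstart) none
         ++ rest.flatMap (fun f => pvLabsOf f overlap)) := by
  induction rest generalizing parts labels praw ppred plabs pstart with
  | nil =>
      simp [pvFinA, pvFlush_parts, pvFlush_labels]
  | cons g rest ih =>
      simp only [List.foldl_cons, pvStepA]
      rw [ih]
      rw [pvFlush_parts, pvFlush_labels]
      simp [pvTextOf, pvLabsOf]

theorem pvJoin_nil_eq_flatten (l : List (List Char)) :
    PySem.Chars.join [] l = l.flatten := by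
  induction l with
  | nil => simp [PySem.Chars.join_nil]
  | cons a l ih =>
      cases l with
      | nil => simp [PySem.Chars.join_singleton]
      | cons b l' =>
          rw [PySem.Chars.join_cons_cons]
          simp only [List.flatten_cons]
          rw [ih]
          simp

theorem pvZip_const {α : Type} (ov : Int) (l : List α) :
    l.zip ((List.range l.length).map (fun _ => ov)) = l.map (fun f => (f, ov)) := by
  induction l with
  | nil => rfl
  | cons a l ih =>
      simp only [List.length_cons, List.range_succ_eq_map, List.map_cons, List.map_map,
        List.zip_cons_cons, List.map_cons]
      rw [show ((List.range l.length).map ((fun _ => ov) ∘ (· + 1))) = (List.range l.length).map (fun _ => ov) from rfl]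
      rw [ih]

-- ===== VERDICT (by name: the statement is the Claim_ definition above) =====
theorem stitch_fragments_no_strip_py_spec : Claim_equal_stitch_fragments_no_strip_py := by
  intro fragments overlap _
  unfold Spec_stitch_fragments_no_strip_py
  cases fragments with
  | nil => rfl
  | cons f rest =>
      unfold stitch_fragments_no_strip_py stitch_fragments_no_strip_py_alt
      simp only [List.foldl_cons]
      have hstep : pvStepA overlap ([], [], none, 0) f
          = ([], [], some (f.1.toList, f.2.1.toList, f.2.2), 0) := rfl
      rw [hstep]
      have h1 := congrArg Prod.fst (pvLoop_inv overlap rest [] [] f.1.toList f.2.1.toList f.2.2 0)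
      have h2 := congrArg Prod.snd (pvLoop_inv overlap rest [] [] f.1.toList f.2.1.toList f.2.2 0)
      simp only at h1 h2
      rw [pvJoin_nil_eq_flatten, h1, h2]
      -- B side: the starts list for f :: rest is 0 :: (overlap, overlap, …)
      simp only [List.length_cons, List.range_succ_eq_map, List.map_cons, List.map_map,
        List.zip_cons_cons, List.flatMap_cons]
      rw [show (List.map ((fun i => if i = 0 then (0 : Int) else overlap) ∘ Nat.succ) (List.range rest.length))
            = (List.range rest.length).map (fun _ => overlap) from
          List.map_congr_left (by intro i _; simp [Function.comp]),
        pvZip_const overlap rest]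
      simp [pvJoin_nil_eq_flatten, pvTextOf, pvLabsOf, List.map_map, Function.comp_def, List.flatMap_map]
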